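-- pv_equiv track=rewrite | github.com/CDCgov/BMGAP | pipeline/AssemblyCleanup/AssemblyStats.py | bin_quality_scores
-- ===== SOURCE A (Python) =====
-- from collections import defaultdict, Counter
--
-- def bin_quality_scores(qual,targets):
--     ### count bases at each quality score
--     qual_counter = defaultdict(int)
--     for x in qual: qual_counter[x] += 1
--     ## count the numeber that fall beflow the threshold
--     qual_thresholds = defaultdict(int)
--     if len(qual_counter) > 0:
--         #count for this contig
--         max_score = max(qual_counter.keys())
--         qual_bases = 0
--         for i in range(0,max_score+1):
--             qual_bases += qual_counter[i]
--             if i in targets: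
--                 qual_thresholds[i] += qual_bases
--     return qual_thresholds
-- ===== SOURCE B (Python) =====
-- def bin_quality_scores(qual, targets):
--     # Sort-and-merge re-implementation: sort the (non-negative) quality scores once,
--     # then sweep the sorted distinct in-range targets with a single pointer.
--     if not qual:
--         return {}
--     s = sorted(x for x in qual if x >= 0)
--     m = max(qual)
--     ts = sorted({t for t in targets if 0 <= t <= m})
--     out = {}
--     i = 0
--     for t in ts:
--         while i < len(s) and s[i] <= t:
--             i += 1
--         out[t] = i
--     return out
-- ===== Notes on version B (the rewrite author's own statement) =====
-- stated objective: faster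
-- what changed: Replaces the scan over every score 0..max(qual) (with a linear 'i in targets' membership test per score) by sorting qual once and sweeping the sorted distinct in-range targets with a single merge pointer.
import Mathlib
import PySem

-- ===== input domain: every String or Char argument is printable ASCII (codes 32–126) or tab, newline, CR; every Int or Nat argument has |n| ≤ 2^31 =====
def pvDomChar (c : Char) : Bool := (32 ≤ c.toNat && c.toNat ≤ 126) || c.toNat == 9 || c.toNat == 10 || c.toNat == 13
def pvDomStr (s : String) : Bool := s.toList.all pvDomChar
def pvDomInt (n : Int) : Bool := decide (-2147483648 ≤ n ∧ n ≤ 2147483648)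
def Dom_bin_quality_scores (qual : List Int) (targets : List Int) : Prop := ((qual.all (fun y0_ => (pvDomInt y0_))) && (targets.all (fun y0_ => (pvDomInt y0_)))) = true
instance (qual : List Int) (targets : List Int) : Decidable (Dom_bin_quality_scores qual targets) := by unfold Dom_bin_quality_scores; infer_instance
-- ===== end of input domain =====

-- B replaces A's scan over every score 0..max(qual) by sort-once + a single merge
-- pointer over the sorted distinct in-range targets (objective: faster).


-- ===== PORT A =====
def bin_quality_scores (qual : List Int) (targets : List Int) : List (Int × Int) :=
  -- qual_counter = defaultdict(int); for x in qual: qual_counter[x] += 1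
  let qual_counter : PySem.Dict Int Int :=
    qual.foldl (fun d x => d.modify x 0 (fun v => v + 1)) PySem.Dict.empty
  -- qual_thresholds = defaultdict(int)
  let qual_thresholds : PySem.Dict Int Int := PySem.Dict.empty
  if qual_counter.items.length > 0 then
    match PySem.List.max? qual_counter.keys id with
    | none => qual_thresholds.items   -- unreachable: the counter is nonempty here
    | some max_score =>
      -- for i in range(0, max_score+1): qual_bases += qual_counter[i]; if i in targets: qual_thresholds[i] += qual_bases
      let st :=
        (PySem.List.pyRange 0 (max_score + 1)).foldl
          (fun (st : Int × PySem.Dict Int Int) i =>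
            let qb := st.1 + qual_counter.getD i 0
            if targets.contains i then (qb, st.2.modify i 0 (fun v => v + qb))
            else (qb, st.2))
          (0, qual_thresholds)
      st.2.items
  else qual_thresholds.items

-- ===== PORT B =====
-- the inner 'while i < len(s) and s[i] <= t: i += 1' loop (rem = the part of s from index i on)
def bqsAdvance (t : Int) : List Int → Nat → Nat × List Int
  | [], i => (i, [])
  | x :: rest, i => if x ≤ t then bqsAdvance t rest (i + 1) else (i, x :: rest)

def bin_quality_scores_alt (qual : List Int) (targets : List Int) : List (Int × Int) :=
  if qual = [] then []
  else
    let s := PySem.List.sorted (qual.filter (fun x => decide (0 ≤ x))) id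
    match PySem.List.max? qual id with
    | none => []   -- unreachable: qual nonempty
    | some m =>
      let ts := PySem.List.sorted
        (PySem.Set.ofList (targets.filter (fun t => decide (0 ≤ t) && decide (t ≤ m)))) id
      let st := ts.foldl
        (fun (st : List (Int × Int) × Nat × List Int) t =>
          let p := bqsAdvance t st.2.2 st.2.1
          (st.1 ++ [(t, (p.1 : Int))], p.1, p.2))
        ([], 0, s)
      st.1

-- ===== PRECONDITION & SPEC =====
def Spec_bin_quality_scores (qual : List Int) (targets : List Int) (out : List (Int × Int)) : Prop := out = bin_quality_scores_alt qual targets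
instance (qual : List Int) (targets : List Int) (out : List (Int × Int)) : Decidable (Spec_bin_quality_scores qual targets out) := by unfold Spec_bin_quality_scores; infer_instance

-- ===== CLAIM (what is proved, stated in full; the proofs are below) =====
def Claim_equal_bin_quality_scores : Prop := ∀ (qual : List Int) (targets : List Int), Dom_bin_quality_scores qual targets → Spec_bin_quality_scores qual targets (bin_quality_scores qual targets)


-- ===== LEMMAS AND PROOFS =====

-- dict facts for a key not present (unfold the PySem.Dict record operations)
theorem bqs_dict_get?_none {L : List (Int × Int)} {k : Int} (h : ∀ p ∈ L, p.1 ≠ k) :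
    (PySem.Dict.mk L).get? k = none := by
  simp [PySem.Dict.get?, List.find?_eq_none]
  intro a b hab
  exact h (a, b) hab

theorem bqs_dict_insert_append {L : List (Int × Int)} {k v : Int} (h : ∀ p ∈ L, p.1 ≠ k) :
    (PySem.Dict.mk L).insert k v = PySem.Dict.mk (L ++ [(k, v)]) := by
  have hc : (PySem.Dict.mk L).contains k = false := by
    simp [PySem.Dict.contains, List.any_eq_false]
    intro a b hab
    exact h (a, b) hab
  simp [PySem.Dict.insert, hc]

theorem bqs_dict_modify_append {L : List (Int × Int)} {k a : Int} (h : ∀ p ∈ L, p.1 ≠ k) :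
    (PySem.Dict.mk L).modify k 0 (fun v => v + a) = PySem.Dict.mk (L ++ [(k, a)]) := by
  have hget : (PySem.Dict.mk L).getD k 0 = 0 := by
    simp [PySem.Dict.getD, bqs_dict_get?_none h]
  simp [PySem.Dict.modify, hget, bqs_dict_insert_append h]

-- cumulative count split: counting up to n+1 adds the bases with score exactly n
theorem bqs_countP_succ (l : List Int) (n : Int) (hn : 0 ≤ n) :
    l.countP (fun x => decide (0 ≤ x) && decide (x < n + 1))
      = l.countP (fun x => decide (0 ≤ x) && decide (x < n)) + l.count n := by
  induction l with
  | nil => simp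
  | cons x xs ih =>
    simp only [List.countP_cons, List.count_cons, ih, beq_iff_eq, Bool.and_eq_true,
      decide_eq_true_eq]
    split_ifs <;> omega

-- A's main loop over range(0, n) characterised
theorem bqs_A_loop (qual targets : List Int) (cnt : PySem.Dict Int Int)
    (hcnt : ∀ i, cnt.getD i 0 = (qual.count i : Int)) (n : Nat) :
    (PySem.List.pyRange 0 (n : Int)).foldl
      (fun (st : Int × PySem.Dict Int Int) i =>
        let qb := st.1 + cnt.getD i 0
        if targets.contains i then (qb, st.2.modify i 0 (fun v => v + qb))
        else (qb, st.2))
      (0, PySem.Dict.empty)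
    = ((qual.countP (fun x => decide (0 ≤ x) && decide (x < (n:Int))) : Int),
       PySem.Dict.mk (((PySem.List.pyRange 0 (n:Int)).filter (fun i => targets.contains i)).map
         (fun i => (i, (qual.countP (fun x => decide (0 ≤ x) && decide (x ≤ i)) : Int))))) := by
  induction n with
  | zero =>
    have h0 : qual.countP (fun x => decide (0 ≤ x) && decide (x < (0:Int))) = 0 :=
      List.countP_eq_zero.mpr (fun y _ => by
        simp only [Bool.and_eq_true, decide_eq_true_eq, not_and]
        intro
        omega)
    simp [PySem.List.pyRange, PySem.Dict.empty, h0]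
  | succ n ih =>
    have hc2 : (((n:Nat) + 1 : Nat) : Int) = (n:Int) + 1 := by push_cast; ring
    have hr : PySem.List.pyRange 0 (((n:Nat) + 1 : Nat) : Int)
        = PySem.List.pyRange 0 (n:Int) ++ [(n:Int)] := by
      rw [hc2]
      exact PySem.List.pyRange_one_succ_right (by positivity)
    have hq : (qual.countP (fun x => decide (0 ≤ x) && decide (x < (n:Int))) : Int)
        + cnt.getD (n:Int) 0
        = (qual.countP (fun x => decide (0 ≤ x) && decide (x < (n:Int) + 1)) : Int) := by
      rw [hcnt]
      have h := bqs_countP_succ qual (n:Int) (by positivity)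
      omega
    have hvn : qual.countP (fun x => decide (0 ≤ x) && decide (x ≤ (n:Int)))
        = qual.countP (fun x => decide (0 ≤ x) && decide (x < (n:Int) + 1)) := by
      apply List.countP_congr
      intro a _
      by_cases h1 : (0:Int) ≤ a <;> by_cases h2 : a ≤ (n:Int) <;>
        simp [h1, h2] <;> try omega
    rw [hr, List.foldl_append, ih, List.filter_append, List.map_append, hc2]
    simp only [List.foldl_cons, List.foldl_nil, List.filter_cons, List.filter_nil]
    by_cases ht : targets.contains (n:Int)
    · have hfresh : ∀ p ∈ ((PySem.List.pyRange 0 (n:Int)).filter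
          (fun i => targets.contains i)).map
          (fun i => (i, (qual.countP (fun x => decide (0 ≤ x) && decide (x ≤ i)) : Int))),
          p.1 ≠ (n:Int) := by
        intro p hp
        rcases List.mem_map.mp hp with ⟨i, hi, rfl⟩
        exact ne_of_lt (PySem.List.mem_pyRange_one.mp (List.mem_filter.mp hi).1).2
      simp only [ht, if_true, List.map_cons, List.map_nil]
      rw [bqs_dict_modify_append hfresh]
      simp only [Prod.mk.injEq]
      exact ⟨hq, by rw [hvn, ← hq]⟩
    · simp only [ht, if_false, Bool.false_eq_true, List.map_nil, List.append_nil]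
      simp only [Prod.mk.injEq]
      exact ⟨hq, trivial⟩

-- the inner while loop of B, on a sorted remainder
theorem bqs_advance (t : Int) (rem : List Int) (i : Nat)
    (h : List.Pairwise (fun a b : Int => a ≤ b) rem) :
    bqsAdvance t rem i
      = (i + rem.countP (fun x => decide (x ≤ t)), rem.filter (fun x => !decide (x ≤ t))) := by
  induction rem generalizing i with
  | nil => simp [bqsAdvance]
  | cons x rest ih =>
    rcases List.pairwise_cons.mp h with ⟨hx, hrest⟩
    by_cases hxt : x ≤ t
    · rw [bqsAdvance, if_pos hxt, ih _ hrest]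
      simp only [List.countP_cons, List.filter_cons, hxt, decide_true, Bool.not_true,
        if_true, Prod.mk.injEq]
      exact ⟨by omega, by simp⟩
    · have h0 : rest.countP (fun x => decide (x ≤ t)) = 0 :=
        List.countP_eq_zero.mpr (fun y hy => by
          have := hx y hy
          simp only [decide_eq_true_eq]
          omega)
      have hf : rest.filter (fun x => !decide (x ≤ t)) = rest :=
        List.filter_eq_self.mpr (fun y hy => by
          have := hx y hy
          simp only [Bool.not_eq_true', decide_eq_false_iff_not]
          omega)
      rw [bqsAdvance, if_neg hxt]
      simp [hxt, h0, hf]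

theorem bqs_count_split (s : List Int) (p t : Int) (hpt : p ≤ t) :
    s.countP (fun x => decide (x ≤ p))
      + (s.filter (fun x => !decide (x ≤ p))).countP (fun x => decide (x ≤ t))
      = s.countP (fun x => decide (x ≤ t)) := by
  rw [List.countP_filter]
  induction s with
  | nil => simp
  | cons x rest ih =>
    simp only [List.countP_cons, Bool.and_eq_true, Bool.not_eq_true', decide_eq_true_eq,
      decide_eq_false_iff_not]
    split_ifs <;> omega

theorem bqs_filter_split (s : List Int) (p t : Int) (hpt : p ≤ t) :
    (s.filter (fun x => !decide (x ≤ p))).filter (fun x => !decide (x ≤ t))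
      = s.filter (fun x => !decide (x ≤ t)) := by
  rw [List.filter_filter]
  apply List.filter_congr
  intro x _
  by_cases h2 : x ≤ t <;> simp [h2] <;> try omega

-- B's fold over the sorted distinct targets, one merge pointer
theorem bqs_B_loop (s : List Int) (hs : List.Pairwise (fun a b : Int => a ≤ b) s)
    (ts : List Int) (p : Int) (hp : ∀ t ∈ ts, p ≤ t)
    (hts : List.Pairwise (fun a b : Int => a ≤ b) ts) (out : List (Int × Int)) :
    (ts.foldl
      (fun (st : List (Int × Int) × Nat × List Int) t =>
        let q := bqsAdvance t st.2.2 st.2.1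
        (st.1 ++ [(t, (q.1 : Int))], q.1, q.2))
      (out, s.countP (fun x => decide (x ≤ p)), s.filter (fun x => !decide (x ≤ p)))).1
    = out ++ ts.map (fun t => (t, (s.countP (fun x => decide (x ≤ t)) : Int))) := by
  induction ts generalizing p out with
  | nil => simp
  | cons t ts' ih =>
    rcases List.pairwise_cons.mp hts with ⟨htt, hts'⟩
    have hpt : p ≤ t := hp t (List.mem_cons_self)
    simp only [List.foldl_cons]
    rw [bqs_advance t _ _ (hs.filter _)]
    rw [bqs_count_split s p t hpt, bqs_filter_split s p t hpt]
    rw [ih t (fun u hu => htt u hu) hts'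
      (out ++ [(t, (s.countP (fun x => decide (x ≤ t)) : Int))])]
    simp

theorem bqs_max_eq {l1 l2 : List Int} (hmem : ∀ x, x ∈ l1 ↔ x ∈ l2) {m1 m2 : Int}
    (h1 : PySem.List.max? l1 id = some m1) (h2 : PySem.List.max? l2 id = some m2) :
    m1 = m2 := by
  have a1 := PySem.List.max?_mem h1
  have a2 := PySem.List.max?_mem h2
  exact le_antisymm (PySem.List.max?_isMax h2 m1 ((hmem m1).1 a1))
    (PySem.List.max?_isMax h1 m2 ((hmem m2).2 a2))

-- B's sorted distinct in-range targets = A's filtered range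
theorem bqs_targets_eq (targets : List Int) (M : Int) (hM : 0 ≤ M) :
    PySem.List.sorted
      (PySem.Set.ofList (targets.filter (fun t => decide (0 ≤ t) && decide (t ≤ M)))) id
    = (PySem.List.pyRange 0 (M + 1)).filter (fun i => targets.contains i) := by
  have hcast : M + 1 = ((M.toNat + 1 : Nat) : Int) := by omega
  have hpw : List.Pairwise (fun a b : Int => a < b)
      ((PySem.List.pyRange 0 (M + 1)).filter (fun i => targets.contains i)) := by
    apply List.Pairwise.filter
    rw [hcast, PySem.List.pyRange_zero_natCast]
    exact (List.pairwise_lt_range).map _ (fun a b hab => by exact_mod_cast hab)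
  apply PySem.List.sorted_eq_of_perm_of_pairwise_lt
  · rw [List.perm_ext_iff_of_nodup (hpw.imp ne_of_lt) (PySem.Set.nodup_ofList _)]
    intro a
    rw [PySem.Set.mem_ofList]
    simp only [List.mem_filter, PySem.List.mem_pyRange_one, List.contains_iff_mem,
      Bool.and_eq_true, decide_eq_true_eq]
    constructor
    · rintro ⟨⟨h0, hlt⟩, hmem⟩
      exact ⟨hmem, h0, by omega⟩
    · rintro ⟨hmem, h0, hb⟩
      exact ⟨⟨h0, by omega⟩, hmem⟩
  · exact hpw

theorem bqs_main (qual targets : List Int) :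
    bin_quality_scores qual targets = bin_quality_scores_alt qual targets := by
  by_cases hq : qual = []
  · subst hq
    rfl
  · have hcounter : qual.foldl (fun d x => d.modify x 0 (fun v => v + 1)) PySem.Dict.empty
        = PySem.Dict.counter qual := rfl
    have hkeys : (PySem.Dict.counter qual).keys = PySem.Set.ofList qual :=
      PySem.Dict.keys_counter qual
    have hkne : (PySem.Dict.counter qual).keys ≠ [] := by
      rcases List.exists_mem_of_ne_nil qual hq with ⟨x, hx⟩
      exact List.ne_nil_of_mem (by rw [hkeys, PySem.Set.mem_ofList]; exact hx)
    have hlen : (PySem.Dict.counter qual).items.length > 0 := by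
      have := List.length_pos_of_ne_nil hkne
      simpa [PySem.Dict.keys] using this
    -- both maxima exist and are the same value M'
    obtain ⟨M, hMq⟩ : ∃ m, PySem.List.max? qual id = some m := by
      cases hc : PySem.List.max? qual id with
      | none => exact absurd ((PySem.List.max?_eq_none_iff qual id).mp hc) hq
      | some m => exact ⟨m, rfl⟩
    obtain ⟨M', hMk⟩ : ∃ m, PySem.List.max? (PySem.Dict.counter qual).keys id = some m := by
      cases hc : PySem.List.max? (PySem.Dict.counter qual).keys id with
      | none => exact absurd ((PySem.List.max?_eq_none_iff _ id).mp hc) hkne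
      | some m => exact ⟨m, rfl⟩
    have hMM : M' = M := by
      refine bqs_max_eq (l1 := (PySem.Dict.counter qual).keys) (l2 := qual) ?_ hMk hMq
      intro x
      rw [hkeys, PySem.Set.mem_ofList]
    subst hMM
    have hA : bin_quality_scores qual targets
        = ((PySem.List.pyRange 0 (M' + 1)).foldl
            (fun (st : Int × PySem.Dict Int Int) i =>
              let qb := st.1 + (PySem.Dict.counter qual).getD i 0
              if targets.contains i then (qb, st.2.modify i 0 (fun v => v + qb))
              else (qb, st.2)) (0, PySem.Dict.empty)).2.items := by
      rw [bin_quality_scores, hcounter, if_pos hlen, hMk]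
    have hB : bin_quality_scores_alt qual targets
        = (let s := PySem.List.sorted (qual.filter (fun x => decide (0 ≤ x))) id
           let ts := PySem.List.sorted
             (PySem.Set.ofList (targets.filter (fun t => decide (0 ≤ t) && decide (t ≤ M')))) id
           (ts.foldl
             (fun (st : List (Int × Int) × Nat × List Int) t =>
               let p := bqsAdvance t st.2.2 st.2.1
               (st.1 ++ [(t, (p.1 : Int))], p.1, p.2))
             ([], 0, s)).1) := by
      rw [bin_quality_scores_alt, if_neg hq, hMq]
    rw [hA, hB]
    set s := PySem.List.sorted (qual.filter (fun x => decide (0 ≤ x))) id with hs_def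
    by_cases hM : 0 ≤ M'
    · -- A side as a map over the filtered range
      have hn : M' + 1 = ((M'.toNat + 1 : Nat) : Int) := by omega
      rw [hn, bqs_A_loop qual targets _ (fun i => PySem.Dict.getD_counter qual i) (M'.toNat + 1)]
      -- B side facts about s
      have hperm : s.Perm (qual.filter (fun x => decide (0 ≤ x))) :=
        PySem.List.sorted_perm _ id false
      have hspw : List.Pairwise (fun a b : Int => a ≤ b) s := by
        have := PySem.List.sorted_pairwise (qual.filter (fun x => decide (0 ≤ x))) (id : Int → Int)
        simpa using this
      have hsnn : ∀ x ∈ s, (0:Int) ≤ x := by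
        intro x hx
        have := hperm.mem_iff.mp hx
        exact of_decide_eq_true (List.mem_filter.mp this).2
      have hts := bqs_targets_eq targets M' hM
      simp only [hts]
      have hcount0 : s.countP (fun x => decide (x ≤ (-1:Int))) = 0 :=
        List.countP_eq_zero.mpr (fun y hy => by
          have := hsnn y hy
          simp only [decide_eq_true_eq]
          omega)
      have hfilter0 : s.filter (fun x => !decide (x ≤ (-1:Int))) = s :=
        List.filter_eq_self.mpr (fun y hy => by
          have := hsnn y hy
          simp only [Bool.not_eq_true', decide_eq_false_iff_not]
          omega)
      have hB2 := bqs_B_loop s hspw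
        ((PySem.List.pyRange 0 (M' + 1)).filter (fun i => targets.contains i)) (-1)
        (fun t ht => by
          have := (PySem.List.mem_pyRange_one.mp (List.mem_filter.mp ht).1).1
          omega)
        (by
          have hpw : List.Pairwise (fun a b : Int => a < b)
              ((PySem.List.pyRange 0 (M' + 1)).filter (fun i => targets.contains i)) := by
            apply List.Pairwise.filter
            rw [hn, PySem.List.pyRange_zero_natCast]
            exact (List.pairwise_lt_range).map _ (fun a b hab => by exact_mod_cast hab)
          exact hpw.imp le_of_lt)
        []
      rw [hcount0, hfilter0] at hB2
      rw [← hn]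
      rw [hB2]
      simp only [List.nil_append]
      -- same target list, same per-target value
      apply List.map_congr_left
      intro t _
      have hv : s.countP (fun x => decide (x ≤ t))
          = qual.countP (fun x => decide (0 ≤ x) && decide (x ≤ t)) := by
        rw [hperm.countP_eq, List.countP_filter]
        apply List.countP_congr
        intro a _
        by_cases h1 : (0:Int) ≤ a <;> by_cases h2 : a ≤ t <;> simp [h1, h2]
      rw [hv]
    · -- all scores negative: both sides are empty
      have hr : PySem.List.pyRange 0 (M' + 1) = [] := by
        simp only [PySem.List.pyRange]
        rw [if_neg (by norm_num : ¬ (1:Int) = 0)]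
        simp only [if_pos (by norm_num : (0:Int) < 1)]
        rw [if_neg (by omega : ¬ (0:Int) < M' + 1)]
        simp
      have htf : targets.filter (fun t => decide (0 ≤ t) && decide (t ≤ M')) = [] := by
        apply List.filter_eq_nil_iff.mpr
        intro a ha
        simp only [Bool.and_eq_true, decide_eq_true_eq, not_and]
        intro
        omega
      rw [hr, htf]
      rfl

-- ===== VERDICT (by name: the statement is the Claim_ definition above) =====
theorem bin_quality_scores_spec : Claim_equal_bin_quality_scores := by
  intro qual targets _
  exact bqs_main qual targets
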